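-- pv_equiv track=rewrite | github.com/jankwizard/ascii-scorewriter | scorewriter.py | tab2str
-- ===== SOURCE A (Python) =====
-- fmt = {
--     "oct_lo": '3',
--     "oct_hi": '4',
--     "note_lo": 'c',
--     "note_hi": 'b',
-- }
--
-- def note2num(note):
--     l = [ 'c', 'c#', 'd', 'd#', 'e', 'f', 'f#', 'g', 'g#', 'a', 'a#', 'b' ]
--     try:
--         return l.index(note)
--     except:
--         return "" # ignore things like b# ...
--
-- def num2note(num):
--     l = [ 'c', 'c#', 'd', 'd#', 'e', 'f', 'f#', 'g', 'g#', 'a', 'a#', 'b' ]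
--     return l[num]
--
-- def tab_oct2str(tab):
--     s = ''
--     notenums = []
--     for note in tab:
--         notenums.append(note2num(note))
--     for i in range(0, 12):
--         if i in notenums:
--             s += ' ' + num2note(i).ljust(2) + ' |'
--         else:
--             s += '    |'
--     return s
--
-- def tab2str(tab):
--     s = "|"
--     for i in range(int(fmt["oct_lo"]), int(fmt["oct_hi"])+1):
--         try:
--             oct_tab = tab[str(i)]
--         except KeyError:
--             tab[str(i)] = []
--             oct_tab = tab[str(i)]
--         s += tab_oct2str(oct_tab)
--
--     lo = note2num(fmt["note_lo"])
--     hi = note2num(fmt["note_hi"])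
--     if hi == 11:
--         return s[lo*5:]
--     else:
--         return s[lo*5:(-11+hi)*5]
-- ===== SOURCE B (Python) =====
-- fmt = {
--     "oct_lo": '3',
--     "oct_hi": '4',
--     "note_lo": 'c',
--     "note_hi": 'b',
-- }
--
-- # precomputed table: note name -> (slot index, rendered 5-char cell)
-- CELL = {
--     'c':  (0,  ' c  |'),
--     'c#': (1,  ' c# |'),
--     'd':  (2,  ' d  |'),
--     'd#': (3,  ' d# |'),
--     'e':  (4,  ' e  |'),
--     'f':  (5,  ' f  |'),
--     'f#': (6,  ' f# |'),
--     'g':  (7,  ' g  |'),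
--     'g#': (8,  ' g# |'),
--     'a':  (9,  ' a  |'),
--     'a#': (10, ' a# |'),
--     'b':  (11, ' b  |'),
-- }
--
-- def tab_oct2str(notes):
--     # scatter pass: write each recognised note's prerendered cell into its slot
--     cells = ['    |'] * 12
--     for note in notes:
--         if note in CELL:
--             i, txt = CELL[note]
--             cells[i] = txt
--     return ''.join(cells)
--
-- def tab2str(tab):
--     lo_oct = int(fmt["oct_lo"])
--     hi_oct = int(fmt["oct_hi"])
--
--     def render(i):
--         if i > hi_oct:
--             return ''
--         return tab_oct2str(tab.setdefault(str(i), [])) + render(i + 1)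
--
--     s = '|' + render(lo_oct)
--     lo = CELL[fmt["note_lo"]][0]
--     hi = CELL[fmt["note_hi"]][0]
--     return s[lo * 5:] if hi == 11 else s[lo * 5:(-11 + hi) * 5]
-- ===== Notes on version B (the rewrite author's own statement) =====
-- stated objective: alternative
-- what changed: A's per-octave collect-then-scan (build the list of note numbers, then membership-test each of the 12 slots, with note2num/num2note/ljust at render time) is replaced by a precomputed note -> (slot, prerendered cell) table scattered into a 12-cell array in one pass, and A's try/except foldl over the octave range by a recursive setdefault-based renderer.
import Mathlib
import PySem

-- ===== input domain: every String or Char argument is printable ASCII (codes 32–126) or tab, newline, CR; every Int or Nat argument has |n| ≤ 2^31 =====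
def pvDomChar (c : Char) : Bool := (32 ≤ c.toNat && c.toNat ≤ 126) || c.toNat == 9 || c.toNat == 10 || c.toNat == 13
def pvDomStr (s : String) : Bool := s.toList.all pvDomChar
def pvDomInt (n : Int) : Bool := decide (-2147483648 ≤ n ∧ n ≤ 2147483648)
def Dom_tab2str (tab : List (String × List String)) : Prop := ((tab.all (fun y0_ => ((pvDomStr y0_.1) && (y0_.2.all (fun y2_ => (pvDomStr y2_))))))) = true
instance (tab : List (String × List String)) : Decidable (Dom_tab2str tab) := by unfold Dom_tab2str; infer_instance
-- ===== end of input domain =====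

-- B replaces A's collect-then-scan octave rendering (gather note numbers, membership-test
-- each of 12 slots) by a precomputed note→(slot, prerendered cell) table scattered into a
-- 12-cell array in one pass, and A's try/except foldl over the octave range by a recursive
-- setdefault renderer; same return value. Both mutate `tab` identically (missing octave
-- keys get inserted); the theorems are about the return value.

-- ===== PORT A =====
def noteNames : List String := ["c", "c#", "d", "d#", "e", "f", "f#", "g", "g#", "a", "a#", "b"]

-- note2num: l.index(note), ValueError → "" ; modelled as Option Nat (none = the "" sentinel,
-- which never equals an int in A's membership test — exact)
def note2num (note : String) : Option Nat := PySem.List.index? noteNames note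

-- num2note: l[num]; every call site passes 0 ≤ num < 12 so getD never takes its default
def num2note (num : Nat) : String := noteNames.getD num ""

-- s.ljust(2): exact (pad right with spaces to width 2), over code points
def ljust2 (s : String) : List Char := s.toList ++ List.replicate (2 - s.toList.length) ' '

def tab_oct2strA (tab : List String) : List Char :=
  let notenums := tab.foldl (fun acc note => acc ++ [note2num note]) []
  (List.range 12).foldl
    (fun s i =>
      s ++ (if some i ∈ notenums then ' ' :: (ljust2 (num2note i) ++ [' ', '|'])
            else "    |".toList))
    []

-- the body of A's octave loop: try tab[str(i)] / except KeyError: tab[str(i)] = [] …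
def stepA (st : PySem.Dict String (List String) × List Char) (i : Int) :
    PySem.Dict String (List String) × List Char :=
  match PySem.Dict.get? st.1 (PySem.Int.toStr i) with
  | some octTab => (st.1, st.2 ++ tab_oct2strA octTab)
  | none =>
      let d := st.1.insert (PySem.Int.toStr i) []
      (d, st.2 ++ tab_oct2strA ((PySem.Dict.get? d (PySem.Int.toStr i)).getD []))

def tab2str (tab : List (String × List String)) : String :=
  let d0 : PySem.Dict String (List String) := PySem.Dict.ofList tab
  let oLo : Int := (PySem.Int.ofStr? "3").getD 0   -- int(fmt["oct_lo"]), always succeeds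
  let oHi : Int := (PySem.Int.ofStr? "4").getD 0
  let st := (PySem.List.pyRange oLo (oHi + 1) 1).foldl stepA (d0, ['|'])
  let s := st.2
  let lo := (note2num "c").getD 0   -- fmt["note_lo"]; always found, getD never defaults
  let hi := (note2num "b").getD 0
  if hi = 11 then String.ofList (PySem.List.slice s (some ((lo : Int) * 5)) none)
  else String.ofList (PySem.List.slice s (some ((lo : Int) * 5)) (some ((-11 + (hi : Int)) * 5)))

-- ===== PORT B =====
-- the precomputed table CELL: note name → (slot index, prerendered 5-char cell)
def cellTable : PySem.Dict String (Nat × List Char) :=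
  PySem.Dict.ofList
    [ ("c",  (0,  " c  |".toList)),
      ("c#", (1,  " c# |".toList)),
      ("d",  (2,  " d  |".toList)),
      ("d#", (3,  " d# |".toList)),
      ("e",  (4,  " e  |".toList)),
      ("f",  (5,  " f  |".toList)),
      ("f#", (6,  " f# |".toList)),
      ("g",  (7,  " g  |".toList)),
      ("g#", (8,  " g# |".toList)),
      ("a",  (9,  " a  |".toList)),
      ("a#", (10, " a# |".toList)),
      ("b",  (11, " b  |".toList)) ]

-- one scatter pass over the notes, then ''.join(cells)
def tab_oct2strB (notes : List String) : List Char :=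
  (notes.foldl
      (fun cells note =>
        match PySem.Dict.get? cellTable note with
        | some p => cells.set p.1 p.2
        | none => cells)
      (List.replicate 12 "    |".toList)).flatten

-- def render(i): if i > hi_oct: return '' ; return tab_oct2str(tab.setdefault(str(i), [])) + render(i+1)
def renderB (d : PySem.Dict String (List String)) (i hiOct : Int) :
    PySem.Dict String (List String) × List Char :=
  if i > hiOct then (d, [])
  else
    let d' := d.setdefault (PySem.Int.toStr i) []
    let part := tab_oct2strB ((PySem.Dict.get? d' (PySem.Int.toStr i)).getD [])
    let rest := renderB d' (i + 1) hiOct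
    (rest.1, part ++ rest.2)
  termination_by (hiOct + 1 - i).toNat
  decreasing_by omega

def tab2str_alt (tab : List (String × List String)) : String :=
  let d0 : PySem.Dict String (List String) := PySem.Dict.ofList tab
  let loOct : Int := (PySem.Int.ofStr? "3").getD 0
  let hiOct : Int := (PySem.Int.ofStr? "4").getD 0
  let s := '|' :: (renderB d0 loOct hiOct).2
  let lo : Nat := ((PySem.Dict.get? cellTable "c").getD (0, [])).1   -- CELL[fmt["note_lo"]][0]; key present
  let hi : Nat := ((PySem.Dict.get? cellTable "b").getD (0, [])).1
  if hi = 11 then String.ofList (PySem.List.slice s (some ((lo : Int) * 5)) none)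
  else String.ofList (PySem.List.slice s (some ((lo : Int) * 5)) (some ((-11 + (hi : Int)) * 5)))

-- ===== PRECONDITION & SPEC =====
def Spec_tab2str (tab : List (String × List String)) (out : String) : Prop := out = tab2str_alt tab
instance (tab : List (String × List String)) (out : String) : Decidable (Spec_tab2str tab out) := by unfold Spec_tab2str; infer_instance

-- ===== CLAIM (what is proved, stated in full; the proofs are below) =====
def Claim_equal_tab2str : Prop := ∀ (tab : List (String × List String)), Dom_tab2str tab → Spec_tab2str tab (tab2str tab)

-- ===== LEMMAS AND PROOFS =====

theorem table_spec (note : String) :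
    PySem.Dict.get? cellTable note =
      (note2num note).map (fun n => (n, ' ' :: (ljust2 (num2note n) ++ [' ', '|']))) := by
  by_cases h1 : note = "c"
  · subst h1; decide
  by_cases h2 : note = "c#"
  · subst h2; decide
  by_cases h3 : note = "d"
  · subst h3; decide
  by_cases h4 : note = "d#"
  · subst h4; decide
  by_cases h5 : note = "e"
  · subst h5; decide
  by_cases h6 : note = "f"
  · subst h6; decide
  by_cases h7 : note = "f#"
  · subst h7; decide
  by_cases h8 : note = "g"
  · subst h8; decide
  by_cases h9 : note = "g#"
  · subst h9; decide
  by_cases h10 : note = "a"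
  · subst h10; decide
  by_cases h11 : note = "a#"
  · subst h11; decide
  by_cases h12 : note = "b"
  · subst h12; decide
  have e1 : ("c" == note) = false := beq_eq_false_iff_ne.mpr (Ne.symm h1)
  have e2 : ("c#" == note) = false := beq_eq_false_iff_ne.mpr (Ne.symm h2)
  have e3 : ("d" == note) = false := beq_eq_false_iff_ne.mpr (Ne.symm h3)
  have e4 : ("d#" == note) = false := beq_eq_false_iff_ne.mpr (Ne.symm h4)
  have e5 : ("e" == note) = false := beq_eq_false_iff_ne.mpr (Ne.symm h5)
  have e6 : ("f" == note) = false := beq_eq_false_iff_ne.mpr (Ne.symm h6)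
  have e7 : ("f#" == note) = false := beq_eq_false_iff_ne.mpr (Ne.symm h7)
  have e8 : ("g" == note) = false := beq_eq_false_iff_ne.mpr (Ne.symm h8)
  have e9 : ("g#" == note) = false := beq_eq_false_iff_ne.mpr (Ne.symm h9)
  have e10 : ("a" == note) = false := beq_eq_false_iff_ne.mpr (Ne.symm h10)
  have e11 : ("a#" == note) = false := beq_eq_false_iff_ne.mpr (Ne.symm h11)
  have e12 : ("b" == note) = false := beq_eq_false_iff_ne.mpr (Ne.symm h12)
  have hidx : note2num note = none := by
    simp [note2num, noteNames, PySem.List.index?, List.idxOf?, List.findIdx?_eq_none_iff]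
    exact ⟨Ne.symm h1, Ne.symm h2, Ne.symm h3, Ne.symm h4, Ne.symm h5, Ne.symm h6,
           Ne.symm h7, Ne.symm h8, Ne.symm h9, Ne.symm h10, Ne.symm h11, Ne.symm h12⟩
  have hmk : cellTable = PySem.Dict.mk
      [ ("c",  (0,  " c  |".toList)), ("c#", (1,  " c# |".toList)), ("d",  (2,  " d  |".toList)),
        ("d#", (3,  " d# |".toList)), ("e",  (4,  " e  |".toList)), ("f",  (5,  " f  |".toList)),
        ("f#", (6,  " f# |".toList)), ("g",  (7,  " g  |".toList)), ("g#", (8,  " g# |".toList)),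
        ("a",  (9,  " a  |".toList)), ("a#", (10, " a# |".toList)), ("b",  (11, " b  |".toList)) ] := by
    decide
  rw [hidx, hmk]
  simp [PySem.Dict.get?, List.find?, e1, e2, e3, e4, e5, e6, e7, e8, e9, e10, e11, e12]

theorem note2num_lt {s : String} {n : Nat} (h : note2num s = some n) : n < 12 := by
  unfold note2num at h
  obtain ⟨hk, -, -⟩ := PySem.List.getElem_of_index?_eq_some h
  simpa [noteNames] using hk

theorem foldl_append_map {α : Type} (g : α → List Char) :
    ∀ (l : List α) (s : List Char),
      l.foldl (fun s i => s ++ g i) s = s ++ (l.map g).flatten := by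
  intro l
  induction l with
  | nil => simp
  | cons x xs ih => intro s; simp [List.foldl_cons, ih]

theorem notenums_eq (tab : List String) :
    tab.foldl (fun acc note => acc ++ [note2num note]) [] = tab.map note2num := by
  have h : ∀ (l : List String) (acc : List (Option Nat)),
      l.foldl (fun acc note => acc ++ [note2num note]) acc = acc ++ l.map note2num := by
    intro l
    induction l with
    | nil => simp
    | cons x xs ih => intro acc; simp [List.foldl_cons, ih]
  simpa using h tab []

theorem scatter_fold (notes : List String) :
    ∀ (cells : List (List Char)), cells.length = 12 →
      notes.foldl
        (fun cells note =>
          match PySem.Dict.get? cellTable note with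
          | some p => cells.set p.1 p.2
          | none => cells)
        cells
      = (List.range 12).map
          (fun i => if some i ∈ notes.map note2num
                    then ' ' :: (ljust2 (num2note i) ++ [' ', '|'])
                    else cells.getD i []) := by
  induction notes with
  | nil =>
      intro cells hlen
      apply List.ext_getElem
      · simp [hlen]
      · intro i h1 h2
        simp [hlen] at h1
        simp [List.getD, h1, hlen]
  | cons note rest ih =>
      intro cells hlen
      simp only [List.foldl_cons]
      have hstep : (match PySem.Dict.get? cellTable note with
            | some p => cells.set p.1 p.2
            | none => cells)
          = (match note2num note with
            | some n => cells.set n (' ' :: (ljust2 (num2note n) ++ [' ', '|']))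
            | none => cells) := by
        rw [table_spec]; cases note2num note <;> rfl
      rw [hstep]
      cases hnn : note2num note with
      | none =>
          rw [ih cells hlen]
          simp [hnn]
      | some n =>
          have hn : n < 12 := note2num_lt hnn
          rw [ih (cells.set n (' ' :: (ljust2 (num2note n) ++ [' ', '|']))) (by simp [hlen])]
          apply List.map_congr_left
          intro i hi
          simp only [List.mem_range] at hi
          by_cases hmem : some i ∈ rest.map note2num
          · simp [hmem, hnn]
          · by_cases hin : i = n
            · subst hin
              simp [hmem, hnn, List.getD, hlen, hn]
            · have hno : ¬ some i ∈ (note2num note :: rest.map note2num) := by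
                simp [hnn, hmem, hin]
              simp only [List.map_cons]
              simp [hmem, hno, List.getD, List.getElem?_set_ne (Ne.symm hin)]

theorem oct_eq (tab : List String) : tab_oct2strA tab = tab_oct2strB tab := by
  unfold tab_oct2strA tab_oct2strB
  rw [notenums_eq, foldl_append_map, scatter_fold tab (List.replicate 12 "    |".toList) (by simp)]
  simp only [List.nil_append]
  congr 1

-- one step of A's octave loop, in B's setdefault vocabulary
theorem stepA_eq (d : PySem.Dict String (List String)) (s : List Char) (i : Int) :
    stepA (d, s) i =
      (d.setdefault (PySem.Int.toStr i) [],
       s ++ tab_oct2strB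
         ((PySem.Dict.get? (d.setdefault (PySem.Int.toStr i) []) (PySem.Int.toStr i)).getD [])) := by
  unfold stepA
  cases hg : PySem.Dict.get? d (PySem.Int.toStr i) with
  | some v =>
      have hc : d.contains (PySem.Int.toStr i) = true := by
        rw [PySem.Dict.contains_eq_isSome_get?, hg]; rfl
      simp [hg, PySem.Dict.setdefault_of_contains d ([] : List String) hc, oct_eq]
  | none =>
      have hc : d.contains (PySem.Int.toStr i) = false :=
        (PySem.Dict.get?_eq_none_iff_contains d (PySem.Int.toStr i)).1 hg
      simp [PySem.Dict.setdefault_of_not_contains d ([] : List String) hc,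
            PySem.Dict.get?_insert_self, oct_eq]

-- ===== VERDICT (by name: the statement is the Claim_ definition above) =====
theorem tab2str_spec : Claim_equal_tab2str := by
  intro tab _
  unfold Spec_tab2str
  simp only [tab2str, tab2str_alt]
  have hrange : PySem.List.pyRange ((PySem.Int.ofStr? "3").getD 0)
      (((PySem.Int.ofStr? "4").getD 0) + 1) 1 = [3, 4] := by decide
  have hlo3 : (PySem.Int.ofStr? "3").getD 0 = (3 : Int) := by decide
  have hhi4 : (PySem.Int.ofStr? "4").getD 0 = (4 : Int) := by decide
  have hA : (note2num "c").getD 0 = 0 ∧ (note2num "b").getD 0 = 11 := by decide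
  have hB : ((PySem.Dict.get? cellTable "c").getD (0, [])).1 = 0 ∧
            ((PySem.Dict.get? cellTable "b").getD (0, [])).1 = 11 := by decide
  rw [hrange, hlo3, hhi4, hA.1, hA.2, hB.1, hB.2]
  simp only [List.foldl_cons, List.foldl_nil]
  rw [stepA_eq, stepA_eq]
  rw [renderB]
  norm_num
  rw [renderB]
  norm_num
  rw [renderB]
  norm_num
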